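-- pv_equiv track=rewrite | github.com/Leapense/problems | 22183번： Приготовление десертов/Приготовление десертов.py | count_compatible_desserts
-- ===== SOURCE A (Python) =====
-- def count_compatible_desserts(n, m, k, incompatible_crust_filling, incompatible_filling_icecream, incompatible_crust_icecream):
--     # Compatibility matrix 3D: initially set everything to True
--     compatible = [[[True for _ in range(k)] for _ in range(m)] for _ in range(n)]
--
--     # Mark incompatible crust-filling pairs
--     for crust, filling in incompatible_crust_filling:
--         # Adjust to zero-indexed
--         crust -= 1
--         filling -= 1
--         for icecream in range(k):
--             compatible[crust][filling][icecream] = False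
--
--     # Mark incompatible filling-icecream pairs
--     for filling, icecream in incompatible_filling_icecream:
--         # Adjust to zero-indexed
--         filling -= 1
--         icecream -= 1
--         for crust in range(n):
--             compatible[crust][filling][icecream] = False
--
--     # Mark incompatible crust-icecream pairs
--     for crust, icecream in incompatible_crust_icecream:
--         # Adjust to zero-indexed
--         crust -= 1
--         icecream -= 1
--         for filling in range(m):
--             compatible[crust][filling][icecream] = False
--
--     # Count all True values in the compatibility 3D matrix
--     count = 0
--     for crust in range(n):
--         for filling in range(m):
--             for icecream in range(k):
--                 if compatible[crust][filling][icecream]: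
--                     count += 1
--
--     return count
-- ===== SOURCE B (Python) =====
-- def count_compatible_desserts(n, m, k, incompatible_crust_filling, incompatible_filling_icecream, incompatible_crust_icecream):
--     # Inclusion-exclusion over the three ban families; never touches the n*m*k grid.
--     if n <= 0 or m <= 0 or k <= 0:
--         return 0
--     cf = set(incompatible_crust_filling)
--     fi = set(incompatible_filling_icecream)
--     ci = set(incompatible_crust_icecream)
--     singles = k * len(cf) + n * len(fi) + m * len(ci)
--     cf_fi = sum(1 for (c, f) in cf for (f2, i) in fi if f2 == f)
--     cf_ci = sum(1 for (c, f) in cf for (c2, i) in ci if c2 == c)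
--     fi_ci = sum(1 for (f, i) in fi for (c, i2) in ci if i2 == i)
--     all3 = sum(1 for (c, f) in cf for (f2, i) in fi if f2 == f and (c, i) in ci)
--     return n * m * k - singles + cf_fi + cf_ci + fi_ci - all3
-- ===== Notes on version B (the rewrite author's own statement) =====
-- stated objective: faster
-- what changed: B replaces A's materialised n*m*k boolean grid (built, three marking sweeps, then a full triple-loop recount) by inclusion-exclusion over the three deduplicated ban sets, so the grid is never touched.
-- outside the precondition, e.g. on count_compatible_desserts(2, 2, 2, [(0, 1), (2, 1)], [], []): A returns 6, B returns 4
import Mathlib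
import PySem

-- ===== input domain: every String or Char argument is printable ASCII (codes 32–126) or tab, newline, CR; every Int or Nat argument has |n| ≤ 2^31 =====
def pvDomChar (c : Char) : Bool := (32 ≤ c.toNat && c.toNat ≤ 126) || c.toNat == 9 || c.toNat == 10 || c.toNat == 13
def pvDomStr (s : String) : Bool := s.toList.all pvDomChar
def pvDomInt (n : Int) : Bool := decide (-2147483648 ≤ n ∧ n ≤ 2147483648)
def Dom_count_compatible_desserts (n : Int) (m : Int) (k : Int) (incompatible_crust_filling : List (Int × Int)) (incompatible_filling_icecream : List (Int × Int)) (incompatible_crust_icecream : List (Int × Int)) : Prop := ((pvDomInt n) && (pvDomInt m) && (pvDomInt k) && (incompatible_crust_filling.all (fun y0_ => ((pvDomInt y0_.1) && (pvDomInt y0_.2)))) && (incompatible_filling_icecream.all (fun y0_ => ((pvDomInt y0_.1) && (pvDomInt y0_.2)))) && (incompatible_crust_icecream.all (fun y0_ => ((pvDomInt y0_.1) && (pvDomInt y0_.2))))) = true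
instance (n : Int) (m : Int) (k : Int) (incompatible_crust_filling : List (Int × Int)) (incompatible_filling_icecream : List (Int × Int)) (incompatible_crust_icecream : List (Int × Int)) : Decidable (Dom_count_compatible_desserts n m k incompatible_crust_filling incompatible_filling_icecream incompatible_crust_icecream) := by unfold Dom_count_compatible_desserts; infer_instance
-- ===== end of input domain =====

-- B counts by inclusion-exclusion over the three deduplicated ban sets instead of building and
-- rescanning A's n*m*k boolean grid; equivalence is proved for ban pairs with valid 1-based coordinates.


-- ===== PORT A =====
-- compatible = [[[True for _ in range(k)] for _ in range(m)] for _ in range(n)]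
def pvMatInit (n m k : Int) : List (List (List Bool)) :=
  (PySem.List.pyRange 0 n 1).map (fun _ =>
    (PySem.List.pyRange 0 m 1).map (fun _ =>
      (PySem.List.pyRange 0 k 1).map (fun _ => true)))

-- compatible[a][b][c] = v  (Python __getitem__/__setitem__; exact for indices Python accepts,
-- which is all that Pre_ admits — on an IndexError input Python raises, the total form leaves mat unchanged)
def pvSet3 (mat : List (List (List Bool))) (a b c : Int) (v : Bool) : List (List (List Bool)) :=
  PySem.List.pySetD mat a
    (PySem.List.pySetD (PySem.List.pyGetD mat a []) b
      (PySem.List.pySetD (PySem.List.pyGetD (PySem.List.pyGetD mat a []) b []) c v))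

-- compatible[a][b][c]  (read; same remark)
def pvGet3 (mat : List (List (List Bool))) (a b c : Int) : Bool :=
  PySem.List.pyGetD (PySem.List.pyGetD (PySem.List.pyGetD mat a []) b []) c false

def count_compatible_desserts (n : Int) (m : Int) (k : Int) (incompatible_crust_filling : List (Int × Int)) (incompatible_filling_icecream : List (Int × Int)) (incompatible_crust_icecream : List (Int × Int)) : Int :=
  let mat0 := pvMatInit n m k
  let mat1 := incompatible_crust_filling.foldl (fun mat p =>
    (PySem.List.pyRange 0 k 1).foldl (fun mat icecream => pvSet3 mat (p.1 - 1) (p.2 - 1) icecream false) mat) mat0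
  let mat2 := incompatible_filling_icecream.foldl (fun mat p =>
    (PySem.List.pyRange 0 n 1).foldl (fun mat crust => pvSet3 mat crust (p.1 - 1) (p.2 - 1) false) mat) mat1
  let mat3 := incompatible_crust_icecream.foldl (fun mat p =>
    (PySem.List.pyRange 0 m 1).foldl (fun mat filling => pvSet3 mat (p.1 - 1) filling (p.2 - 1) false) mat) mat2
  (PySem.List.pyRange 0 n 1).foldl (fun cnt crust =>
    (PySem.List.pyRange 0 m 1).foldl (fun cnt filling =>
      (PySem.List.pyRange 0 k 1).foldl (fun cnt icecream =>
        if pvGet3 mat3 crust filling icecream then cnt + 1 else cnt) cnt) cnt) 0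

-- ===== PORT B =====
def count_compatible_desserts_alt (n : Int) (m : Int) (k : Int) (incompatible_crust_filling : List (Int × Int)) (incompatible_filling_icecream : List (Int × Int)) (incompatible_crust_icecream : List (Int × Int)) : Int :=
  if n ≤ 0 ∨ m ≤ 0 ∨ k ≤ 0 then 0
  else
    let cf := PySem.Set.ofList incompatible_crust_filling
    let fi := PySem.Set.ofList incompatible_filling_icecream
    let ci := PySem.Set.ofList incompatible_crust_icecream
    let singles := k * (cf.length : Int) + n * (fi.length : Int) + m * (ci.length : Int)
    -- sum(1 for (c,f) in cf for (f2,i) in fi if f2 == f)  : length of the matching join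
    let cf_fi := ((cf.flatMap (fun p => fi.filter (fun q => q.1 == p.2))).length : Int)
    let cf_ci := ((cf.flatMap (fun p => ci.filter (fun q => q.1 == p.1))).length : Int)
    let fi_ci := ((fi.flatMap (fun p => ci.filter (fun q => q.2 == p.2))).length : Int)
    let all3 := ((cf.flatMap (fun p => fi.filter (fun q => q.1 == p.2 && ci.contains (p.1, q.2)))).length : Int)
    n * m * k - singles + cf_fi + cf_ci + fi_ci - all3

-- ===== PRECONDITION & SPEC =====
-- Pre_ admits exactly the ban pairs whose 1-based coordinates are valid for their two dimensions
-- (a list's bound is only needed when its marking loop actually runs, i.e. the third dimension is positive).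
-- Outside it A raises IndexError, or — for a coordinate in (1-dim..0] — silently bans a wrapped-around
-- grid cell via Python negative indexing: an accidental corner no caller would specify, which B's
-- set arithmetic does not reproduce.
def Pre_count_compatible_desserts (n : Int) (m : Int) (k : Int) (incompatible_crust_filling : List (Int × Int)) (incompatible_filling_icecream : List (Int × Int)) (incompatible_crust_icecream : List (Int × Int)) : Prop :=
  (0 < k → ∀ p ∈ incompatible_crust_filling, 1 ≤ p.1 ∧ p.1 ≤ n ∧ 1 ≤ p.2 ∧ p.2 ≤ m) ∧
  (0 < n → ∀ p ∈ incompatible_filling_icecream, 1 ≤ p.1 ∧ p.1 ≤ m ∧ 1 ≤ p.2 ∧ p.2 ≤ k) ∧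
  (0 < m → ∀ p ∈ incompatible_crust_icecream, 1 ≤ p.1 ∧ p.1 ≤ n ∧ 1 ≤ p.2 ∧ p.2 ≤ k)
instance (n : Int) (m : Int) (k : Int) (incompatible_crust_filling : List (Int × Int)) (incompatible_filling_icecream : List (Int × Int)) (incompatible_crust_icecream : List (Int × Int)) : Decidable (Pre_count_compatible_desserts n m k incompatible_crust_filling incompatible_filling_icecream incompatible_crust_icecream) := by unfold Pre_count_compatible_desserts; infer_instance

def pvWitness_count_compatible_desserts : Int × Int × Int × (List (Int × Int)) × (List (Int × Int)) × (List (Int × Int)) :=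
  (2, 3, 2, [(1, 2), (2, 3)], [(3, 1)], [(2, 2)])

def Spec_count_compatible_desserts (n : Int) (m : Int) (k : Int) (incompatible_crust_filling : List (Int × Int)) (incompatible_filling_icecream : List (Int × Int)) (incompatible_crust_icecream : List (Int × Int)) (out : Int) : Prop := out = count_compatible_desserts_alt n m k incompatible_crust_filling incompatible_filling_icecream incompatible_crust_icecream
instance (n : Int) (m : Int) (k : Int) (incompatible_crust_filling : List (Int × Int)) (incompatible_filling_icecream : List (Int × Int)) (incompatible_crust_icecream : List (Int × Int)) (out : Int) : Decidable (Spec_count_compatible_desserts n m k incompatible_crust_filling incompatible_filling_icecream incompatible_crust_icecream out) := by unfold Spec_count_compatible_desserts; infer_instance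

-- ===== CLAIM (what is proved, stated in full; the proofs are below) =====
def Claim_equal_count_compatible_desserts : Prop := ∀ (n : Int) (m : Int) (k : Int) (incompatible_crust_filling : List (Int × Int)) (incompatible_filling_icecream : List (Int × Int)) (incompatible_crust_icecream : List (Int × Int)), Dom_count_compatible_desserts n m k incompatible_crust_filling incompatible_filling_icecream incompatible_crust_icecream → Pre_count_compatible_desserts n m k incompatible_crust_filling incompatible_filling_icecream incompatible_crust_icecream → Spec_count_compatible_desserts n m k incompatible_crust_filling incompatible_filling_icecream incompatible_crust_icecream (count_compatible_desserts n m k incompatible_crust_filling incompatible_filling_icecream incompatible_crust_icecream)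

-- ===== LEMMAS AND PROOFS =====

-- The rectangular-shape invariant of A's 3-D matrix
def pvRect (mat : List (List (List Bool))) (n m k : Int) : Prop :=
  mat.length = n.toNat ∧ ∀ row ∈ mat, row.length = m.toNat ∧ ∀ col ∈ row, col.length = k.toNat

theorem pvGetD_pySetD_int {α : Type} (xs : List α) (i j : Int) (hi : 0 ≤ i)
    (hj0 : 0 ≤ j) (hjlen : j < (xs.length : Int)) (w d : α) :
    PySem.List.pyGetD (PySem.List.pySetD xs i w) j d = if j = i then w else PySem.List.pyGetD xs j d := by
  rw [PySem.List.pySetD_of_nonneg _ _ hi,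
      PySem.List.pyGetD_eq_getElem _ d hj0 (by simpa using hjlen),
      List.getElem_set, PySem.List.pyGetD_eq_getElem _ d hj0 hjlen]
  by_cases h : j = i
  · simp [h, show i.toNat = j.toNat by omega]
  · simp [h, show ¬ i.toNat = j.toNat by omega]



theorem pvRect_init (n m k : Int) : pvRect (pvMatInit n m k) n m k := by
  refine ⟨by simp [pvMatInit, PySem.List.length_pyRange_one], ?_⟩
  intro row hrow
  simp only [pvMatInit, List.mem_map] at hrow
  obtain ⟨_, _, rfl⟩ := hrow
  refine ⟨by simp [PySem.List.length_pyRange_one], ?_⟩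
  intro col hcol
  simp only [List.mem_map] at hcol
  obtain ⟨_, _, rfl⟩ := hcol
  simp [PySem.List.length_pyRange_one]

theorem pvRect_set3 {mat : List (List (List Bool))} {n m k : Int} (h : pvRect mat n m k)
    {a b c : Int} (ha : 0 ≤ a) (hb : 0 ≤ b) (hc : 0 ≤ c) (v : Bool) :
    pvRect (pvSet3 mat a b c v) n m k := by
  obtain ⟨hL, hRows⟩ := h
  unfold pvSet3
  rw [PySem.List.pySetD_of_nonneg _ _ ha]
  by_cases hain : a.toNat < mat.length
  case neg =>
    rw [List.set_eq_of_length_le (by omega)]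
    exact ⟨hL, hRows⟩
  have halt : a < (mat.length : Int) := by omega
  have hrowa : PySem.List.pyGetD mat a ([] : List (List Bool)) = mat[a.toNat] :=
    PySem.List.pyGetD_eq_getElem _ _ ha halt
  have hfacts := hRows mat[a.toNat] (List.getElem_mem hain)
  rw [hrowa]
  refine ⟨by simpa using hL, ?_⟩
  intro row hrow
  rcases List.mem_or_eq_of_mem_set hrow with hmem | rfl
  · exact hRows row hmem
  · rw [PySem.List.pySetD_of_nonneg _ _ hb]
    by_cases hbin : b.toNat < mat[a.toNat].length
    case neg =>
      rw [List.set_eq_of_length_le (by omega)]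
      exact hfacts
    have hblt : b < ((mat[a.toNat] : List (List Bool)).length : Int) := by omega
    have hcola : PySem.List.pyGetD mat[a.toNat] b ([] : List Bool) = mat[a.toNat][b.toNat] :=
      PySem.List.pyGetD_eq_getElem _ _ hb hblt
    rw [hcola]
    refine ⟨by simpa using hfacts.1, ?_⟩
    intro col hcol
    rcases List.mem_or_eq_of_mem_set hcol with hmem | rfl
    · exact hfacts.2 col hmem
    · rw [PySem.List.pySetD_of_nonneg _ _ hc]
      simpa using hfacts.2 mat[a.toNat][b.toNat] (List.getElem_mem hbin)

theorem pvGet3_set3 {mat : List (List (List Bool))} {n m k : Int} (h : pvRect mat n m k)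
    {a b c x y z : Int} (ha : 0 ≤ a ∧ a < n) (hb : 0 ≤ b ∧ b < m) (hc : 0 ≤ c ∧ c < k)
    (hx : 0 ≤ x ∧ x < n) (hy : 0 ≤ y ∧ y < m) (hz : 0 ≤ z ∧ z < k) (v : Bool) :
    pvGet3 (pvSet3 mat a b c v) x y z = if x = a ∧ y = b ∧ z = c then v else pvGet3 mat x y z := by
  obtain ⟨hL, hRows⟩ := h
  have hain : a.toNat < mat.length := by omega
  have halt : a < (mat.length : Int) := by omega
  have hxlt : x < (mat.length : Int) := by omega
  have hrowa : PySem.List.pyGetD mat a ([] : List (List Bool)) = mat[a.toNat] :=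
    PySem.List.pyGetD_eq_getElem _ _ ha.1 halt
  have hfacts := hRows mat[a.toNat] (List.getElem_mem hain)
  have hbin : b.toNat < mat[a.toNat].length := by omega
  have hblt : b < ((mat[a.toNat] : List (List Bool)).length : Int) := by omega
  have hcola : PySem.List.pyGetD mat[a.toNat] b ([] : List Bool) = mat[a.toNat][b.toNat] :=
    PySem.List.pyGetD_eq_getElem _ _ hb.1 hblt
  have hcfacts := hfacts.2 mat[a.toNat][b.toNat] (List.getElem_mem hbin)
  unfold pvSet3 pvGet3
  rw [hrowa, hcola, pvGetD_pySetD_int _ _ _ ha.1 hx.1 hxlt]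
  by_cases hxa : x = a
  · subst hxa
    rw [if_pos rfl, hrowa,
        pvGetD_pySetD_int _ _ _ hb.1 hy.1 (by rw [hfacts.1]; omega)]
    by_cases hyb : y = b
    · subst hyb
      rw [if_pos rfl, hcola,
          pvGetD_pySetD_int _ _ _ hc.1 hz.1 (by rw [hcfacts]; omega)]
      by_cases hzc : z = c
      · simp [hzc]
      · simp [hzc]
    · simp [hyb]
  · simp [hxa]

theorem pvGet3_init {n m k x y z : Int} (hx : 0 ≤ x ∧ x < n) (hy : 0 ≤ y ∧ y < m) (hz : 0 ≤ z ∧ z < k) :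
    pvGet3 (pvMatInit n m k) x y z = true := by
  unfold pvGet3 pvMatInit
  rw [PySem.List.pyGetD_map_pyRange_of_nonneg _ _ _ _ hx.1 hx.2,
      PySem.List.pyGetD_map_pyRange_of_nonneg _ _ _ _ hy.1 hy.2,
      PySem.List.pyGetD_map_pyRange_of_nonneg _ _ _ _ hz.1 hz.2]

-- inner loop of marking pass 1: for icecream in ics: mat[a][b][ic] = False
theorem pvMark1Inner {n m k : Int} (ics : List Int) (hics : ∀ ic ∈ ics, 0 ≤ ic ∧ ic < k)
    {a b : Int} (ha : 0 ≤ a ∧ a < n) (hb : 0 ≤ b ∧ b < m) :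
    ∀ mat, pvRect mat n m k →
      (pvRect (ics.foldl (fun mat ic => pvSet3 mat a b ic false) mat) n m k ∧
       ∀ x y z : Int, (0 ≤ x ∧ x < n) → (0 ≤ y ∧ y < m) → (0 ≤ z ∧ z < k) →
         pvGet3 (ics.foldl (fun mat ic => pvSet3 mat a b ic false) mat) x y z
           = if x = a ∧ y = b ∧ z ∈ ics then false else pvGet3 mat x y z) := by
  induction ics with
  | nil => intro mat h; simpa using h
  | cons ic t ih =>
    intro mat h
    have hic := hics ic (List.mem_cons_self ..)
    have ht : ∀ i ∈ t, 0 ≤ i ∧ i < k := fun i hi => hics i (List.mem_cons_of_mem _ hi)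
    have h' : pvRect (pvSet3 mat a b ic false) n m k := pvRect_set3 h ha.1 hb.1 hic.1 false
    have IH := ih ht (pvSet3 mat a b ic false) h'
    refine ⟨by simpa using IH.1, ?_⟩
    intro x y z hx hy hz
    have := IH.2 x y z hx hy hz
    simp only [List.foldl_cons] at *
    rw [this, pvGet3_set3 h ha hb hic hx hy hz]
    by_cases h1 : x = a ∧ y = b
    · rcases h1 with ⟨rfl, rfl⟩
      by_cases h2 : z ∈ t
      · simp [h2]
      · by_cases h3 : z = ic <;> simp [h2, h3]
    · simp only [List.mem_cons]
      have : ¬ (x = a ∧ y = b ∧ (z = ic ∨ z ∈ t)) := fun ⟨u, v, _⟩ => h1 ⟨u, v⟩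
      have h1' : ¬ (x = a ∧ y = b ∧ z ∈ t) := fun ⟨u, v, _⟩ => h1 ⟨u, v⟩
      have h1'' : ¬ (x = a ∧ y = b ∧ z = ic) := fun ⟨u, v, _⟩ => h1 ⟨u, v⟩
      rw [if_neg this, if_neg h1', if_neg h1'']

theorem pvMark2Inner {n m k : Int} (cs : List Int) (hcs : ∀ c ∈ cs, 0 ≤ c ∧ c < n)
    {a b : Int} (ha : 0 ≤ a ∧ a < m) (hb : 0 ≤ b ∧ b < k) :
    ∀ mat, pvRect mat n m k →
      (pvRect (cs.foldl (fun mat c => pvSet3 mat c a b false) mat) n m k ∧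
       ∀ x y z : Int, (0 ≤ x ∧ x < n) → (0 ≤ y ∧ y < m) → (0 ≤ z ∧ z < k) →
         pvGet3 (cs.foldl (fun mat c => pvSet3 mat c a b false) mat) x y z
           = if x ∈ cs ∧ y = a ∧ z = b then false else pvGet3 mat x y z) := by
  induction cs with
  | nil => intro mat h; simpa using h
  | cons c t ih =>
    intro mat h
    have hc := hcs c (List.mem_cons_self ..)
    have ht : ∀ i ∈ t, 0 ≤ i ∧ i < n := fun i hi => hcs i (List.mem_cons_of_mem _ hi)
    have h' : pvRect (pvSet3 mat c a b false) n m k := pvRect_set3 h hc.1 ha.1 hb.1 false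
    have IH := ih ht (pvSet3 mat c a b false) h'
    refine ⟨by simpa using IH.1, ?_⟩
    intro x y z hx hy hz
    have := IH.2 x y z hx hy hz
    simp only [List.foldl_cons] at *
    rw [this, pvGet3_set3 h hc ha hb hx hy hz]
    by_cases h1 : y = a ∧ z = b
    · rcases h1 with ⟨rfl, rfl⟩
      by_cases h2 : x ∈ t
      · simp [h2]
      · by_cases h3 : x = c <;> simp [h2, h3]
    · simp only [List.mem_cons]
      have hA : ¬ ((x = c ∨ x ∈ t) ∧ y = a ∧ z = b) := fun ⟨_, u, v⟩ => h1 ⟨u, v⟩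
      have hB : ¬ (x ∈ t ∧ y = a ∧ z = b) := fun ⟨_, u, v⟩ => h1 ⟨u, v⟩
      have hC : ¬ (x = c ∧ y = a ∧ z = b) := fun ⟨_, u, v⟩ => h1 ⟨u, v⟩
      rw [if_neg hA, if_neg hB, if_neg hC]

theorem pvMark3Inner {n m k : Int} (fs : List Int) (hfs : ∀ f ∈ fs, 0 ≤ f ∧ f < m)
    {a b : Int} (ha : 0 ≤ a ∧ a < n) (hb : 0 ≤ b ∧ b < k) :
    ∀ mat, pvRect mat n m k →
      (pvRect (fs.foldl (fun mat f => pvSet3 mat a f b false) mat) n m k ∧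
       ∀ x y z : Int, (0 ≤ x ∧ x < n) → (0 ≤ y ∧ y < m) → (0 ≤ z ∧ z < k) →
         pvGet3 (fs.foldl (fun mat f => pvSet3 mat a f b false) mat) x y z
           = if x = a ∧ y ∈ fs ∧ z = b then false else pvGet3 mat x y z) := by
  induction fs with
  | nil => intro mat h; simpa using h
  | cons f t ih =>
    intro mat h
    have hf := hfs f (List.mem_cons_self ..)
    have ht : ∀ i ∈ t, 0 ≤ i ∧ i < m := fun i hi => hfs i (List.mem_cons_of_mem _ hi)
    have h' : pvRect (pvSet3 mat a f b false) n m k := pvRect_set3 h ha.1 hf.1 hb.1 false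
    have IH := ih ht (pvSet3 mat a f b false) h'
    refine ⟨by simpa using IH.1, ?_⟩
    intro x y z hx hy hz
    have := IH.2 x y z hx hy hz
    simp only [List.foldl_cons] at *
    rw [this, pvGet3_set3 h ha hf hb hx hy hz]
    by_cases h1 : x = a ∧ z = b
    · rcases h1 with ⟨rfl, rfl⟩
      by_cases h2 : y ∈ t
      · simp [h2]
      · by_cases h3 : y = f <;> simp [h2, h3]
    · simp only [List.mem_cons]
      have hA : ¬ (x = a ∧ (y = f ∨ y ∈ t) ∧ z = b) := fun ⟨u, _, v⟩ => h1 ⟨u, v⟩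
      have hB : ¬ (x = a ∧ y ∈ t ∧ z = b) := fun ⟨u, _, v⟩ => h1 ⟨u, v⟩
      have hC : ¬ (x = a ∧ y = f ∧ z = b) := fun ⟨u, _, v⟩ => h1 ⟨u, v⟩
      rw [if_neg hA, if_neg hB, if_neg hC]

-- marking pass 1 over the crust-filling ban list
theorem pvMark1 {n m k : Int} (l : List (Int × Int))
    (hl : ∀ p ∈ l, 1 ≤ p.1 ∧ p.1 ≤ n ∧ 1 ≤ p.2 ∧ p.2 ≤ m) :
    ∀ mat, pvRect mat n m k →
      (pvRect (l.foldl (fun mat p => (PySem.List.pyRange 0 k 1).foldl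
          (fun mat ic => pvSet3 mat (p.1 - 1) (p.2 - 1) ic false) mat) mat) n m k ∧
       ∀ x y z : Int, (0 ≤ x ∧ x < n) → (0 ≤ y ∧ y < m) → (0 ≤ z ∧ z < k) →
         pvGet3 (l.foldl (fun mat p => (PySem.List.pyRange 0 k 1).foldl
           (fun mat ic => pvSet3 mat (p.1 - 1) (p.2 - 1) ic false) mat) mat) x y z
           = (pvGet3 mat x y z && !decide ((x + 1, y + 1) ∈ l))) := by
  induction l with
  | nil => intro mat h; simpa using h
  | cons p t ih =>
    intro mat h
    have hp := hl p (List.mem_cons_self ..)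
    have ht : ∀ q ∈ t, 1 ≤ q.1 ∧ q.1 ≤ n ∧ 1 ≤ q.2 ∧ q.2 ≤ m :=
      fun q hq => hl q (List.mem_cons_of_mem _ hq)
    have hics : ∀ ic ∈ PySem.List.pyRange 0 k 1, 0 ≤ ic ∧ ic < k := by
      intro ic hic; rw [PySem.List.mem_pyRange_one] at hic; exact hic
    have inner := pvMark1Inner (n := n) (m := m) (k := k) (PySem.List.pyRange 0 k 1) hics
      (a := p.1 - 1) (b := p.2 - 1) (by omega) (by omega) mat h
    have IH := ih ht _ inner.1
    refine ⟨IH.1, ?_⟩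
    intro x y z hx hy hz
    simp only [List.foldl_cons]
    rw [IH.2 x y z hx hy hz, inner.2 x y z hx hy hz]
    have hzmem : z ∈ PySem.List.pyRange 0 k 1 := by rw [PySem.List.mem_pyRange_one]; exact ⟨hz.1, hz.2⟩
    by_cases h1 : x = p.1 - 1 ∧ y = p.2 - 1
    · have hpe : (x + 1, y + 1) = p := by
        rw [Prod.ext_iff]; exact ⟨by omega, by omega⟩
      rw [if_pos ⟨h1.1, h1.2, hzmem⟩, hpe]
      simp
    · have hpe : ¬ ((x + 1, y + 1) = p) := by
        intro hcon
        rw [Prod.ext_iff] at hcon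
        exact h1 ⟨by omega, by omega⟩
      have hno : ¬ (x = p.1 - 1 ∧ y = p.2 - 1 ∧ z ∈ PySem.List.pyRange 0 k 1) :=
        fun ⟨u, v, _⟩ => h1 ⟨u, v⟩
      rw [if_neg hno]
      simp [hpe]

-- marking pass 2 over the filling-icecream ban list
theorem pvMark2 {n m k : Int} (l : List (Int × Int))
    (hl : ∀ p ∈ l, 1 ≤ p.1 ∧ p.1 ≤ m ∧ 1 ≤ p.2 ∧ p.2 ≤ k) :
    ∀ mat, pvRect mat n m k →
      (pvRect (l.foldl (fun mat p => (PySem.List.pyRange 0 n 1).foldl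
          (fun mat c => pvSet3 mat c (p.1 - 1) (p.2 - 1) false) mat) mat) n m k ∧
       ∀ x y z : Int, (0 ≤ x ∧ x < n) → (0 ≤ y ∧ y < m) → (0 ≤ z ∧ z < k) →
         pvGet3 (l.foldl (fun mat p => (PySem.List.pyRange 0 n 1).foldl
           (fun mat c => pvSet3 mat c (p.1 - 1) (p.2 - 1) false) mat) mat) x y z
           = (pvGet3 mat x y z && !decide ((y + 1, z + 1) ∈ l))) := by
  induction l with
  | nil => intro mat h; simpa using h
  | cons p t ih =>
    intro mat h
    have hp := hl p (List.mem_cons_self ..)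
    have ht : ∀ q ∈ t, 1 ≤ q.1 ∧ q.1 ≤ m ∧ 1 ≤ q.2 ∧ q.2 ≤ k :=
      fun q hq => hl q (List.mem_cons_of_mem _ hq)
    have hcs : ∀ c ∈ PySem.List.pyRange 0 n 1, 0 ≤ c ∧ c < n := by
      intro c hc; rw [PySem.List.mem_pyRange_one] at hc; exact hc
    have inner := pvMark2Inner (n := n) (m := m) (k := k) (PySem.List.pyRange 0 n 1) hcs
      (a := p.1 - 1) (b := p.2 - 1) (by omega) (by omega) mat h
    have IH := ih ht _ inner.1
    refine ⟨IH.1, ?_⟩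
    intro x y z hx hy hz
    simp only [List.foldl_cons]
    rw [IH.2 x y z hx hy hz, inner.2 x y z hx hy hz]
    have hxmem : x ∈ PySem.List.pyRange 0 n 1 := by rw [PySem.List.mem_pyRange_one]; exact ⟨hx.1, hx.2⟩
    by_cases h1 : y = p.1 - 1 ∧ z = p.2 - 1
    · have hpe : (y + 1, z + 1) = p := by
        rw [Prod.ext_iff]; exact ⟨by omega, by omega⟩
      rw [if_pos ⟨hxmem, h1.1, h1.2⟩, hpe]
      simp
    · have hpe : ¬ ((y + 1, z + 1) = p) := by
        intro hcon
        rw [Prod.ext_iff] at hcon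
        exact h1 ⟨by omega, by omega⟩
      have hno : ¬ (x ∈ PySem.List.pyRange 0 n 1 ∧ y = p.1 - 1 ∧ z = p.2 - 1) :=
        fun ⟨_, u, v⟩ => h1 ⟨u, v⟩
      rw [if_neg hno]
      simp [hpe]

-- marking pass 3 over the crust-icecream ban list
theorem pvMark3 {n m k : Int} (l : List (Int × Int))
    (hl : ∀ p ∈ l, 1 ≤ p.1 ∧ p.1 ≤ n ∧ 1 ≤ p.2 ∧ p.2 ≤ k) :
    ∀ mat, pvRect mat n m k →
      (pvRect (l.foldl (fun mat p => (PySem.List.pyRange 0 m 1).foldl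
          (fun mat f => pvSet3 mat (p.1 - 1) f (p.2 - 1) false) mat) mat) n m k ∧
       ∀ x y z : Int, (0 ≤ x ∧ x < n) → (0 ≤ y ∧ y < m) → (0 ≤ z ∧ z < k) →
         pvGet3 (l.foldl (fun mat p => (PySem.List.pyRange 0 m 1).foldl
           (fun mat f => pvSet3 mat (p.1 - 1) f (p.2 - 1) false) mat) mat) x y z
           = (pvGet3 mat x y z && !decide ((x + 1, z + 1) ∈ l))) := by
  induction l with
  | nil => intro mat h; simpa using h
  | cons p t ih =>
    intro mat h
    have hp := hl p (List.mem_cons_self ..)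
    have ht : ∀ q ∈ t, 1 ≤ q.1 ∧ q.1 ≤ n ∧ 1 ≤ q.2 ∧ q.2 ≤ k :=
      fun q hq => hl q (List.mem_cons_of_mem _ hq)
    have hfs : ∀ f ∈ PySem.List.pyRange 0 m 1, 0 ≤ f ∧ f < m := by
      intro f hf; rw [PySem.List.mem_pyRange_one] at hf; exact hf
    have inner := pvMark3Inner (n := n) (m := m) (k := k) (PySem.List.pyRange 0 m 1) hfs
      (a := p.1 - 1) (b := p.2 - 1) (by omega) (by omega) mat h
    have IH := ih ht _ inner.1
    refine ⟨IH.1, ?_⟩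
    intro x y z hx hy hz
    simp only [List.foldl_cons]
    rw [IH.2 x y z hx hy hz, inner.2 x y z hx hy hz]
    have hymem : y ∈ PySem.List.pyRange 0 m 1 := by rw [PySem.List.mem_pyRange_one]; exact ⟨hy.1, hy.2⟩
    by_cases h1 : x = p.1 - 1 ∧ z = p.2 - 1
    · have hpe : (x + 1, z + 1) = p := by
        rw [Prod.ext_iff]; exact ⟨by omega, by omega⟩
      rw [if_pos ⟨h1.1, hymem, h1.2⟩, hpe]
      simp
    · have hpe : ¬ ((x + 1, z + 1) = p) := by
        intro hcon
        rw [Prod.ext_iff] at hcon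
        exact h1 ⟨by omega, by omega⟩
      have hno : ¬ (x = p.1 - 1 ∧ y ∈ PySem.List.pyRange 0 m 1 ∧ z = p.2 - 1) :=
        fun ⟨u, _, v⟩ => h1 ⟨u, v⟩
      rw [if_neg hno]
      simp [hpe]

-- sum of a point indicator over a duplicate-free list
theorem pvSumPoint {l : List Int} (hnd : l.Nodup) (a t : Int) :
    (l.map (fun x => if x = a then t else 0)).sum = if a ∈ l then t else 0 := by
  induction l with
  | nil => simp
  | cons x xs ih =>
    have hx : x ∉ xs := (List.nodup_cons.mp hnd).1
    have ih' := ih (List.nodup_cons.mp hnd).2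
    simp only [List.map_cons, List.sum_cons, ih', List.mem_cons]
    by_cases hxa : x = a
    · subst hxa
      simp [hx]
    · have : ¬ a = x := fun h => hxa h.symm
      simp [hxa, this]

-- Σ_{x<N} Σ_{y<M} [ (x+1,y+1) ∈ s ] * w(x+1,y+1)  =  Σ_{p ∈ s} w p   (s duplicate-free, coords in range)
theorem pvSumPairGrid (N M : Int) (s : List (Int × Int)) (hnd : s.Nodup)
    (hs : ∀ p ∈ s, 1 ≤ p.1 ∧ p.1 ≤ N ∧ 1 ≤ p.2 ∧ p.2 ≤ M) (w : Int × Int → Int) :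
    ((PySem.List.pyRange 0 N 1).map (fun x =>
      ((PySem.List.pyRange 0 M 1).map (fun y =>
        if (x + 1, y + 1) ∈ s then w (x + 1, y + 1) else 0)).sum)).sum = (s.map w).sum := by
  induction s with
  | nil => simp
  | cons p t ih =>
    have hpt : p ∉ t := (List.nodup_cons.mp hnd).1
    have hp := hs p (List.mem_cons_self ..)
    have ih' := ih (List.nodup_cons.mp hnd).2 (fun q hq => hs q (List.mem_cons_of_mem _ hq))
    have hsplit : ∀ x y : Int,
        (if (x + 1, y + 1) ∈ p :: t then w (x + 1, y + 1) else 0)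
          = (if (x + 1, y + 1) = p then w p else 0)
            + (if (x + 1, y + 1) ∈ t then w (x + 1, y + 1) else 0) := by
      intro x y
      by_cases h1 : (x + 1, y + 1) = p
      · rw [h1]
        simp [hpt]
      · by_cases h2 : (x + 1, y + 1) ∈ t <;> simp [h1, h2]
    calc ((PySem.List.pyRange 0 N 1).map (fun x =>
            ((PySem.List.pyRange 0 M 1).map (fun y =>
              if (x + 1, y + 1) ∈ p :: t then w (x + 1, y + 1) else 0)).sum)).sum
        = ((PySem.List.pyRange 0 N 1).map (fun x =>
            ((PySem.List.pyRange 0 M 1).map (fun y =>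
              if (x + 1, y + 1) = p then w p else 0)).sum
            + ((PySem.List.pyRange 0 M 1).map (fun y =>
              if (x + 1, y + 1) ∈ t then w (x + 1, y + 1) else 0)).sum)).sum := by
          refine congrArg _ (List.map_congr_left ?_)
          intro x _
          rw [← PySem.List.sum_map_add_int]
          refine congrArg _ (List.map_congr_left ?_)
          intro y _
          exact hsplit x y
      _ = ((PySem.List.pyRange 0 N 1).map (fun x =>
            ((PySem.List.pyRange 0 M 1).map (fun y =>
              if (x + 1, y + 1) = p then w p else 0)).sum)).sum + (t.map w).sum := by
          rw [PySem.List.sum_map_add_int, ih']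
      _ = w p + (t.map w).sum := by
          have hinner : ∀ x : Int,
              ((PySem.List.pyRange 0 M 1).map (fun y =>
                if (x + 1, y + 1) = p then w p else 0)).sum
              = if x = p.1 - 1 then w p else 0 := by
            intro x
            have : ∀ y : Int, (if (x + 1, y + 1) = p then w p else 0)
                = if y = p.2 - 1 then (if x = p.1 - 1 then w p else 0) else 0 := by
              intro y
              by_cases h1 : (x + 1, y + 1) = p
              · rw [Prod.mk.injEq] at h1
                rw [if_pos (show y = p.2 - 1 by omega), if_pos (show x = p.1 - 1 by omega),
                    if_pos (show (x + 1, y + 1) = p by rw [Prod.mk.injEq]; exact ⟨by omega, by omega⟩)]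
              · rw [if_neg h1]
                by_cases h2 : y = p.2 - 1
                · rw [if_pos h2, if_neg (by
                    intro h3
                    exact h1 (by rw [Prod.mk.injEq]; exact ⟨by omega, by omega⟩))]
                · rw [if_neg h2]
            rw [List.map_congr_left (fun y _ => this y),
                pvSumPoint (PySem.List.nodup_pyRange_one 0 M),
                if_pos (by rw [PySem.List.mem_pyRange_one]; omega)]
          rw [List.map_congr_left (fun x _ => hinner x),
              pvSumPoint (PySem.List.nodup_pyRange_one 0 N),
              if_pos (by rw [PySem.List.mem_pyRange_one]; omega)]
      _ = ((p :: t).map w).sum := by simp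

-- Σ_{i<K} [ (a, i+1) ∈ s ∧ P ]  =  |{q ∈ s : q.1 = a ∧ P q}|   (s duplicate-free, second coords in range)
theorem pvSumLineFst (K : Int) (s : List (Int × Int)) (hnd : s.Nodup)
    (hs : ∀ q ∈ s, 1 ≤ q.2 ∧ q.2 ≤ K) (a : Int) (P : Int × Int → Bool) :
    ((PySem.List.pyRange 0 K 1).map (fun i =>
      if (a, i + 1) ∈ s ∧ P (a, i + 1) = true then (1 : Int) else 0)).sum
    = ((s.filter (fun q => q.1 == a && P q)).length : Int) := by
  induction s with
  | nil => simp
  | cons q t ih =>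
    have hqt : q ∉ t := (List.nodup_cons.mp hnd).1
    have hq := hs q (List.mem_cons_self ..)
    have ih' := ih (List.nodup_cons.mp hnd).2 (fun r hr => hs r (List.mem_cons_of_mem _ hr))
    have hsplit : ∀ i : Int,
        (if (a, i + 1) ∈ q :: t ∧ P (a, i + 1) = true then (1 : Int) else 0)
          = (if i = q.2 - 1 then (if q.1 = a ∧ P q = true then (1 : Int) else 0) else 0)
            + (if (a, i + 1) ∈ t ∧ P (a, i + 1) = true then (1 : Int) else 0) := by
      intro i
      have hqa : (a, i + 1) = q ↔ (q.1 = a ∧ i = q.2 - 1) := by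
        rw [Prod.mk.injEq]
        constructor
        · intro h; exact ⟨by omega, by omega⟩
        · intro h; exact ⟨by omega, by omega⟩
      have hmc : ((a, i + 1) ∈ q :: t) ↔ ((a, i + 1) = q ∨ (a, i + 1) ∈ t) := List.mem_cons
      by_cases h1 : (a, i + 1) = q
      · have hnt : (a, i + 1) ∉ t := by rw [h1]; exact hqt
        have hPq : P (a, i + 1) = P q := by rw [h1]
        by_cases h2 : P q = true
        · rw [if_pos (⟨hmc.mpr (Or.inl h1), by rw [hPq]; exact h2⟩ :
                ((a, i + 1) ∈ q :: t ∧ P (a, i + 1) = true)),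
              if_pos (hqa.mp h1).2, if_pos ⟨(hqa.mp h1).1, h2⟩,
              if_neg (fun hc => hnt hc.1)]
          omega
        · rw [if_neg (fun hc : ((a, i + 1) ∈ q :: t ∧ P (a, i + 1) = true) =>
                h2 (by rw [← hPq]; exact hc.2)),
              if_pos (hqa.mp h1).2, if_neg (fun hc => h2 hc.2),
              if_neg (fun hc : ((a, i + 1) ∈ t ∧ P (a, i + 1) = true) =>
                h2 (by rw [← hPq]; exact hc.2))]
          omega
      · have hmem : ((a, i + 1) ∈ q :: t ∧ P (a, i + 1) = true)
            ↔ ((a, i + 1) ∈ t ∧ P (a, i + 1) = true) := by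
          rw [hmc]
          constructor
          · rintro ⟨h2 | h2, h3⟩
            · exact absurd h2 h1
            · exact ⟨h2, h3⟩
          · rintro ⟨h2, h3⟩; exact ⟨Or.inr h2, h3⟩
        have hfirst : (if i = q.2 - 1 then (if q.1 = a ∧ P q = true then (1 : Int) else 0) else 0) = 0 := by
          by_cases h3 : i = q.2 - 1
          · rw [if_pos h3, if_neg (fun hc => h1 (hqa.mpr ⟨hc.1, h3⟩))]
          · rw [if_neg h3]
        rw [hfirst]
        by_cases h4 : (a, i + 1) ∈ t ∧ P (a, i + 1) = true
        · rw [if_pos (hmem.mpr h4), if_pos h4]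
          omega
        · rw [if_neg (fun hc => h4 (hmem.mp hc)), if_neg h4]
          omega
    rw [List.map_congr_left (fun i _ => hsplit i), PySem.List.sum_map_add_int, ih',
        pvSumPoint (PySem.List.nodup_pyRange_one 0 K),
        if_pos (by rw [PySem.List.mem_pyRange_one]; omega)]
    by_cases h6 : q.1 = a ∧ P q = true
    · rw [if_pos h6, List.filter_cons_of_pos (by simp [h6.1, h6.2])]
      simp only [List.length_cons]
      push_cast
      ring
    · rw [if_neg h6, List.filter_cons_of_neg (by
        simp only [Bool.and_eq_true, beq_iff_eq]
        intro hcon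
        exact h6 ⟨hcon.1, hcon.2⟩)]
      ring

-- Σ_{c<N} [ (c+1, a) ∈ s ]  =  |{q ∈ s : q.2 = a}|   (s duplicate-free, first coords in range)
theorem pvSumLineSnd (N : Int) (s : List (Int × Int)) (hnd : s.Nodup)
    (hs : ∀ q ∈ s, 1 ≤ q.1 ∧ q.1 ≤ N) (a : Int) :
    ((PySem.List.pyRange 0 N 1).map (fun c =>
      if (c + 1, a) ∈ s then (1 : Int) else 0)).sum
    = ((s.filter (fun q => q.2 == a)).length : Int) := by
  induction s with
  | nil => simp
  | cons q t ih =>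
    have hqt : q ∉ t := (List.nodup_cons.mp hnd).1
    have hq := hs q (List.mem_cons_self ..)
    have ih' := ih (List.nodup_cons.mp hnd).2 (fun r hr => hs r (List.mem_cons_of_mem _ hr))
    have hsplit : ∀ c : Int,
        (if (c + 1, a) ∈ q :: t then (1 : Int) else 0)
          = (if c = q.1 - 1 then (if q.2 = a then (1 : Int) else 0) else 0)
            + (if (c + 1, a) ∈ t then (1 : Int) else 0) := by
      intro c
      have hqa : (c + 1, a) = q ↔ (q.2 = a ∧ c = q.1 - 1) := by
        rw [Prod.mk.injEq]
        constructor
        · intro h; exact ⟨by omega, by omega⟩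
        · intro h; exact ⟨by omega, by omega⟩
      by_cases h1 : (c + 1, a) = q
      · have hnt : (c + 1, a) ∉ t := by rw [h1]; exact hqt
        rw [if_pos (List.mem_cons.mpr (Or.inl h1)), if_pos (hqa.mp h1).2,
            if_pos (hqa.mp h1).1, if_neg hnt]
        omega
      · have hfirst : (if c = q.1 - 1 then (if q.2 = a then (1 : Int) else 0) else 0) = 0 := by
          by_cases h3 : c = q.1 - 1
          · rw [if_pos h3, if_neg (fun hc => h1 (hqa.mpr ⟨hc, h3⟩))]
          · rw [if_neg h3]
        have hmem : ((c + 1, a) ∈ q :: t) ↔ ((c + 1, a) ∈ t) := by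
          rw [List.mem_cons]
          constructor
          · rintro (h2 | h2)
            · exact absurd h2 h1
            · exact h2
          · exact Or.inr
        rw [hfirst]
        by_cases h4 : (c + 1, a) ∈ t
        · rw [if_pos (hmem.mpr h4), if_pos h4]
          omega
        · rw [if_neg (fun hc => h4 (hmem.mp hc)), if_neg h4]
          omega
    rw [List.map_congr_left (fun c _ => hsplit c), PySem.List.sum_map_add_int, ih',
        pvSumPoint (PySem.List.nodup_pyRange_one 0 N),
        if_pos (by rw [PySem.List.mem_pyRange_one]; omega)]
    by_cases h6 : q.2 = a
    · rw [if_pos h6, List.filter_cons_of_pos (by simp [h6])]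
      simp only [List.length_cons]
      push_cast
      ring
    · rw [if_neg h6, List.filter_cons_of_neg (by simp [h6])]
      ring

-- interchanging two finite list sums
theorem pvSumSwap {α β : Type} (l1 : List α) (l2 : List β) (f : α → β → Int) :
    (l1.map (fun x => (l2.map (fun y => f x y)).sum)).sum
      = (l2.map (fun y => (l1.map (fun x => f x y)).sum)).sum := by
  induction l1 with
  | nil => simp
  | cons x xs ih =>
    simp only [List.map_cons, List.sum_cons, ih, ← PySem.List.sum_map_add_int]

theorem pvSumMapSub {α : Type} (xs : List α) (f g : α → Int) :
    (xs.map (fun x => f x - g x)).sum = (xs.map f).sum - (xs.map g).sum := by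
  induction xs with
  | nil => simp
  | cons a t ih => simp only [List.map_cons, List.sum_cons, ih]; ring

theorem pvSumConst (d c : Int) (hd : 0 ≤ d) :
    ((PySem.List.pyRange 0 d 1).map (fun _ => c)).sum = d * c := by
  rw [PySem.List.sum_map_const_int, PySem.List.length_pyRange_one]
  have : (((d - 0).toNat : Int)) = d := by omega
  rw [this]

theorem pvSumIte {α : Type} (l : List α) (P : Prop) [Decidable P] (X : α → Int) :
    (l.map (fun i => if P then X i else 0)).sum = if P then (l.map X).sum else 0 := by
  by_cases hP : P <;> simp [hP]

theorem pvIteAnd (P Q : Prop) [Decidable P] [Decidable Q] :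
    (if P ∧ Q then (1 : Int) else 0) = if P then (if Q then (1 : Int) else 0) else 0 := by
  by_cases hP : P <;> by_cases hQ : Q <;> simp [hP, hQ]

theorem pvFlatLen (s : List (Int × Int)) (g : Int × Int → List (Int × Int)) :
    ((s.flatMap g).length : Int) = (s.map (fun p => ((g p).length : Int))).sum := by
  rw [List.length_flatMap]
  push_cast
  rw [List.map_map]
  rfl

-- the triple grid sum
def pvS3 (n m k : Int) (F : Int → Int → Int → Int) : Int :=
  ((PySem.List.pyRange 0 n 1).map (fun c => ((PySem.List.pyRange 0 m 1).map (fun f =>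
    ((PySem.List.pyRange 0 k 1).map (fun i => F c f i)).sum)).sum)).sum

theorem pvS3_congr (n m k : Int) (F G : Int → Int → Int → Int) (h : ∀ c f i, F c f i = G c f i) :
    pvS3 n m k F = pvS3 n m k G := by
  unfold pvS3
  refine congrArg _ (List.map_congr_left ?_)
  intro c _
  refine congrArg _ (List.map_congr_left ?_)
  intro f _
  exact congrArg _ (List.map_congr_left (fun i _ => h c f i))

theorem pvS3_add (n m k : Int) (F G : Int → Int → Int → Int) :
    pvS3 n m k (fun c f i => F c f i + G c f i) = pvS3 n m k F + pvS3 n m k G := by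
  unfold pvS3
  simp only [PySem.List.sum_map_add_int]

theorem pvS3_sub (n m k : Int) (F G : Int → Int → Int → Int) :
    pvS3 n m k (fun c f i => F c f i - G c f i) = pvS3 n m k F - pvS3 n m k G := by
  unfold pvS3
  simp only [pvSumMapSub]

theorem pvT0 (n m k : Int) (hn : 0 ≤ n) (hm : 0 ≤ m) (hk : 0 ≤ k) :
    pvS3 n m k (fun _ _ _ => (1 : Int)) = n * m * k := by
  unfold pvS3
  beta_reduce
  simp only [pvSumConst _ _ hk, pvSumConst _ _ hm, pvSumConst _ _ hn]
  ring

theorem pvLineFstPlain (K : Int) (s : List (Int × Int)) (hnd : s.Nodup)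
    (hsnd : ∀ q ∈ s, 1 ≤ q.2 ∧ q.2 ≤ K) (a : Int) :
    ((PySem.List.pyRange 0 K 1).map (fun i => if (a, i + 1) ∈ s then (1 : Int) else 0)).sum
      = ((s.filter (fun q => q.1 == a)).length : Int) := by
  have h := pvSumLineFst K s hnd hsnd a (fun _ => true)
  simpa using h

theorem pvT1 (n m k : Int) (hk : 0 ≤ k) (s1 : List (Int × Int)) (hnd1 : s1.Nodup)
    (b1 : ∀ p ∈ s1, 1 ≤ p.1 ∧ p.1 ≤ n ∧ 1 ≤ p.2 ∧ p.2 ≤ m) :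
    pvS3 n m k (fun c f _ => if (c + 1, f + 1) ∈ s1 then (1 : Int) else 0) = (s1.length : Int) * k := by
  unfold pvS3
  simp only [pvSumConst _ _ hk, mul_ite, mul_one, mul_zero]
  rw [pvSumPairGrid n m s1 hnd1 b1 (fun _ => k), PySem.List.sum_map_const_int]

theorem pvT2 (n m k : Int) (hn : 0 ≤ n) (s2 : List (Int × Int)) (hnd2 : s2.Nodup)
    (b2 : ∀ p ∈ s2, 1 ≤ p.1 ∧ p.1 ≤ m ∧ 1 ≤ p.2 ∧ p.2 ≤ k) :
    pvS3 n m k (fun _ f i => if (f + 1, i + 1) ∈ s2 then (1 : Int) else 0) = n * (s2.length : Int) := by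
  unfold pvS3
  rw [show (fun c : Int => ((PySem.List.pyRange 0 m 1).map (fun f =>
        ((PySem.List.pyRange 0 k 1).map (fun i =>
          if (f + 1, i + 1) ∈ s2 then (1 : Int) else 0)).sum)).sum)
      = (fun _ : Int => ((s2.map (fun _ => (1 : Int))).sum)) from
    funext (fun c => pvSumPairGrid m k s2 hnd2 b2 (fun _ => 1))]
  rw [pvSumConst _ _ hn, PySem.List.sum_map_const_int]
  ring

theorem pvT3 (n m k : Int) (hm : 0 ≤ m) (s3 : List (Int × Int)) (hnd3 : s3.Nodup)
    (b3 : ∀ p ∈ s3, 1 ≤ p.1 ∧ p.1 ≤ n ∧ 1 ≤ p.2 ∧ p.2 ≤ k) :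
    pvS3 n m k (fun c _ i => if (c + 1, i + 1) ∈ s3 then (1 : Int) else 0) = m * (s3.length : Int) := by
  unfold pvS3
  simp only [pvSumConst _ _ hm]
  rw [PySem.List.sum_map_const_mul_int]
  rw [pvSumPairGrid n k s3 hnd3 b3 (fun _ => 1), PySem.List.sum_map_const_int]
  ring

theorem pvT12 (n m k : Int) (s1 s2 : List (Int × Int)) (hnd1 : s1.Nodup) (hnd2 : s2.Nodup)
    (b1 : ∀ p ∈ s1, 1 ≤ p.1 ∧ p.1 ≤ n ∧ 1 ≤ p.2 ∧ p.2 ≤ m)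
    (hsnd2 : ∀ q ∈ s2, 1 ≤ q.2 ∧ q.2 ≤ k) :
    pvS3 n m k (fun c f i => if (c + 1, f + 1) ∈ s1 ∧ (f + 1, i + 1) ∈ s2 then (1 : Int) else 0)
      = ((s1.flatMap (fun p => s2.filter (fun q => q.1 == p.2))).length : Int) := by
  unfold pvS3
  simp only [pvIteAnd, pvSumIte]
  simp only [pvLineFstPlain k s2 hnd2 hsnd2]
  rw [pvSumPairGrid n m s1 hnd1 b1 (fun p => ((s2.filter (fun q => q.1 == p.2)).length : Int))]
  rw [pvFlatLen]

theorem pvT13 (n m k : Int) (s1 s3 : List (Int × Int)) (hnd1 : s1.Nodup) (hnd3 : s3.Nodup)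
    (b1 : ∀ p ∈ s1, 1 ≤ p.1 ∧ p.1 ≤ n ∧ 1 ≤ p.2 ∧ p.2 ≤ m)
    (hsnd3 : ∀ q ∈ s3, 1 ≤ q.2 ∧ q.2 ≤ k) :
    pvS3 n m k (fun c f i => if (c + 1, f + 1) ∈ s1 ∧ (c + 1, i + 1) ∈ s3 then (1 : Int) else 0)
      = ((s1.flatMap (fun p => s3.filter (fun q => q.1 == p.1))).length : Int) := by
  unfold pvS3
  simp only [pvIteAnd, pvSumIte]
  simp only [pvLineFstPlain k s3 hnd3 hsnd3]
  rw [pvSumPairGrid n m s1 hnd1 b1 (fun p => ((s3.filter (fun q => q.1 == p.1)).length : Int))]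
  rw [pvFlatLen]

theorem pvT23 (n m k : Int) (s2 s3 : List (Int × Int)) (hnd2 : s2.Nodup) (hnd3 : s3.Nodup)
    (b2 : ∀ p ∈ s2, 1 ≤ p.1 ∧ p.1 ≤ m ∧ 1 ≤ p.2 ∧ p.2 ≤ k)
    (hfst3 : ∀ q ∈ s3, 1 ≤ q.1 ∧ q.1 ≤ n) :
    pvS3 n m k (fun c f i => if (f + 1, i + 1) ∈ s2 ∧ (c + 1, i + 1) ∈ s3 then (1 : Int) else 0)
      = ((s2.flatMap (fun p => s3.filter (fun q => q.2 == p.2))).length : Int) := by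
  unfold pvS3
  simp only [pvIteAnd]
  have hc : ∀ c : Int, ((PySem.List.pyRange 0 m 1).map (fun f =>
      ((PySem.List.pyRange 0 k 1).map (fun i =>
        if (f + 1, i + 1) ∈ s2 then (if (c + 1, i + 1) ∈ s3 then (1 : Int) else 0) else 0)).sum)).sum
      = (s2.map (fun p => if (c + 1, p.2) ∈ s3 then (1 : Int) else 0)).sum :=
    fun c => pvSumPairGrid m k s2 hnd2 b2 (fun p => if (c + 1, p.2) ∈ s3 then (1 : Int) else 0)
  rw [List.map_congr_left (fun c _ => hc c), pvSumSwap]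
  simp only [pvSumLineSnd n s3 hnd3 hfst3]
  rw [pvFlatLen]

theorem pvT123 (n m k : Int) (s1 s2 s3 : List (Int × Int))
    (hnd1 : s1.Nodup) (hnd2 : s2.Nodup)
    (b1 : ∀ p ∈ s1, 1 ≤ p.1 ∧ p.1 ≤ n ∧ 1 ≤ p.2 ∧ p.2 ≤ m)
    (hsnd2 : ∀ q ∈ s2, 1 ≤ q.2 ∧ q.2 ≤ k) :
    pvS3 n m k (fun c f i =>
        if (c + 1, f + 1) ∈ s1 ∧ (f + 1, i + 1) ∈ s2 ∧ (c + 1, i + 1) ∈ s3 then (1 : Int) else 0)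
      = ((s1.flatMap (fun p =>
          s2.filter (fun q => q.1 == p.2 && s3.contains (p.1, q.2)))).length : Int) := by
  unfold pvS3
  simp only [pvIteAnd, pvSumIte]
  have hline : ∀ c a : Int, ((PySem.List.pyRange 0 k 1).map (fun i =>
      if (a, i + 1) ∈ s2 ∧ (c + 1, i + 1) ∈ s3 then (1 : Int) else 0)).sum
      = ((s2.filter (fun q => q.1 == a && decide ((c + 1, q.2) ∈ s3))).length : Int) := by
    intro c a
    have h := pvSumLineFst k s2 hnd2 hsnd2 a (fun q => decide ((c + 1, q.2) ∈ s3))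
    simpa using h
  simp only [pvIteAnd] at hline
  simp only [hline]
  rw [pvSumPairGrid n m s1 hnd1 b1
      (fun p => ((s2.filter (fun q => q.1 == p.2 && decide ((p.1, q.2) ∈ s3))).length : Int))]
  rw [pvFlatLen]
  simp only [List.contains_eq_mem]

-- inclusion-exclusion over the three duplicate-free ban sets
theorem pvIE (n m k : Int) (hn : 0 < n) (hm : 0 < m) (hk : 0 < k)
    (s1 s2 s3 : List (Int × Int)) (hnd1 : s1.Nodup) (hnd2 : s2.Nodup) (hnd3 : s3.Nodup)
    (b1 : ∀ p ∈ s1, 1 ≤ p.1 ∧ p.1 ≤ n ∧ 1 ≤ p.2 ∧ p.2 ≤ m)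
    (b2 : ∀ p ∈ s2, 1 ≤ p.1 ∧ p.1 ≤ m ∧ 1 ≤ p.2 ∧ p.2 ≤ k)
    (b3 : ∀ p ∈ s3, 1 ≤ p.1 ∧ p.1 ≤ n ∧ 1 ≤ p.2 ∧ p.2 ≤ k) :
    pvS3 n m k (fun c f i =>
        if (c + 1, f + 1) ∈ s1 ∨ (f + 1, i + 1) ∈ s2 ∨ (c + 1, i + 1) ∈ s3 then (0 : Int) else 1)
      = n * m * k - (k * (s1.length : Int) + n * (s2.length : Int) + m * (s3.length : Int))
        + ((s1.flatMap (fun p => s2.filter (fun q => q.1 == p.2))).length : Int)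
        + ((s1.flatMap (fun p => s3.filter (fun q => q.1 == p.1))).length : Int)
        + ((s2.flatMap (fun p => s3.filter (fun q => q.2 == p.2))).length : Int)
        - ((s1.flatMap (fun p =>
            s2.filter (fun q => q.1 == p.2 && s3.contains (p.1, q.2)))).length : Int) := by
  have hsnd2 : ∀ q ∈ s2, 1 ≤ q.2 ∧ q.2 ≤ k := fun q hq => ⟨(b2 q hq).2.2.1, (b2 q hq).2.2.2⟩
  have hsnd3 : ∀ q ∈ s3, 1 ≤ q.2 ∧ q.2 ≤ k := fun q hq => ⟨(b3 q hq).2.2.1, (b3 q hq).2.2.2⟩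
  have hfst3 : ∀ q ∈ s3, 1 ≤ q.1 ∧ q.1 ≤ n := fun q hq => ⟨(b3 q hq).1, (b3 q hq).2.1⟩
  have hpt : ∀ c f i : Int,
      (if (c + 1, f + 1) ∈ s1 ∨ (f + 1, i + 1) ∈ s2 ∨ (c + 1, i + 1) ∈ s3 then (0 : Int) else 1)
      = ((((((1 - (if (c + 1, f + 1) ∈ s1 then (1 : Int) else 0))
          - (if (f + 1, i + 1) ∈ s2 then (1 : Int) else 0))
          - (if (c + 1, i + 1) ∈ s3 then (1 : Int) else 0))
          + (if (c + 1, f + 1) ∈ s1 ∧ (f + 1, i + 1) ∈ s2 then (1 : Int) else 0))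
          + (if (c + 1, f + 1) ∈ s1 ∧ (c + 1, i + 1) ∈ s3 then (1 : Int) else 0))
          + (if (f + 1, i + 1) ∈ s2 ∧ (c + 1, i + 1) ∈ s3 then (1 : Int) else 0))
          - (if (c + 1, f + 1) ∈ s1 ∧ (f + 1, i + 1) ∈ s2 ∧ (c + 1, i + 1) ∈ s3
             then (1 : Int) else 0) := by
    intro c f i
    by_cases hA : (c + 1, f + 1) ∈ s1 <;> by_cases hB : (f + 1, i + 1) ∈ s2 <;>
      by_cases hC : (c + 1, i + 1) ∈ s3 <;> simp [hA, hB, hC]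
  rw [pvS3_congr _ _ _ _ _ hpt]
  simp only [pvS3_sub, pvS3_add]
  rw [pvT0 n m k hn.le hm.le hk.le, pvT1 n m k hk.le s1 hnd1 b1, pvT2 n m k hn.le s2 hnd2 b2,
      pvT3 n m k hm.le s3 hnd3 b3, pvT12 n m k s1 s2 hnd1 hnd2 b1 hsnd2,
      pvT13 n m k s1 s3 hnd1 hnd3 b1 hsnd3, pvT23 n m k s2 s3 hnd2 hnd3 b2 hfst3,
      pvT123 n m k s1 s2 s3 hnd1 hnd2 b1 hsnd2]
  ring

-- A's count as a triple grid sum of good-cell indicators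
theorem pvA_eq_sum (n m k : Int) (l1 l2 l3 : List (Int × Int))
    (hl1 : ∀ p ∈ l1, 1 ≤ p.1 ∧ p.1 ≤ n ∧ 1 ≤ p.2 ∧ p.2 ≤ m)
    (hl2 : ∀ p ∈ l2, 1 ≤ p.1 ∧ p.1 ≤ m ∧ 1 ≤ p.2 ∧ p.2 ≤ k)
    (hl3 : ∀ p ∈ l3, 1 ≤ p.1 ∧ p.1 ≤ n ∧ 1 ≤ p.2 ∧ p.2 ≤ k) :
    count_compatible_desserts n m k l1 l2 l3 = pvS3 n m k (fun c f i =>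
      if (c + 1, f + 1) ∈ l1 ∨ (f + 1, i + 1) ∈ l2 ∨ (c + 1, i + 1) ∈ l3 then (0 : Int) else 1) := by
  have R0 := pvRect_init n m k
  have M1 := pvMark1 (n := n) (m := m) (k := k) l1 hl1 _ R0
  have M2 := pvMark2 (n := n) (m := m) (k := k) l2 hl2 _ M1.1
  have M3 := pvMark3 (n := n) (m := m) (k := k) l3 hl3 _ M2.1
  simp only [count_compatible_desserts]
  simp only [PySem.List.foldl_count_if, PySem.List.foldl_add, zero_add]
  simp only [← PySem.List.sum_map_ite_one_zero]
  unfold pvS3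
  refine congrArg _ (List.map_congr_left ?_)
  intro c hc
  refine congrArg _ (List.map_congr_left ?_)
  intro f hf
  refine congrArg _ (List.map_congr_left ?_)
  intro i hi
  rw [PySem.List.mem_pyRange_one] at hc hf hi
  have hget3 := M3.2 c f i ⟨hc.1, hc.2⟩ ⟨hf.1, hf.2⟩ ⟨hi.1, hi.2⟩
  have hget2 := M2.2 c f i ⟨hc.1, hc.2⟩ ⟨hf.1, hf.2⟩ ⟨hi.1, hi.2⟩
  have hget1 := M1.2 c f i ⟨hc.1, hc.2⟩ ⟨hf.1, hf.2⟩ ⟨hi.1, hi.2⟩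
  have hinit := pvGet3_init (n := n) (m := m) (k := k) ⟨hc.1, hc.2⟩ ⟨hf.1, hf.2⟩ ⟨hi.1, hi.2⟩
  rw [hget3, hget2, hget1, hinit]
  by_cases hA : (c + 1, f + 1) ∈ l1 <;> by_cases hB : (f + 1, i + 1) ∈ l2 <;>
    by_cases hC : (c + 1, i + 1) ∈ l3 <;> simp [hA, hB, hC]

theorem count_compatible_desserts_spec : Claim_equal_count_compatible_desserts := by
  intro n m k l1 l2 l3 _ hpre
  unfold Spec_count_compatible_desserts
  obtain ⟨hP1, hP2, hP3⟩ := hpre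
  by_cases hpos : 0 < n ∧ 0 < m ∧ 0 < k
  case neg =>
    have hB : count_compatible_desserts_alt n m k l1 l2 l3 = 0 := by
      unfold count_compatible_desserts_alt
      rw [if_pos (by omega)]
    rw [hB]
    simp only [count_compatible_desserts]
    rcases (by omega : n ≤ 0 ∨ m ≤ 0 ∨ k ≤ 0) with h | h | h <;>
      simp [PySem.List.pyRange_one_eq_nil h, List.foldl_fixed]
  obtain ⟨hn, hm, hk⟩ := hpos
  have hl1 := hP1 hk
  have hl2 := hP2 hn
  have hl3 := hP3 hm
  rw [pvA_eq_sum n m k l1 l2 l3 hl1 hl2 hl3]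
  have hmem : ∀ c f i : Int,
      (if (c + 1, f + 1) ∈ l1 ∨ (f + 1, i + 1) ∈ l2 ∨ (c + 1, i + 1) ∈ l3 then (0 : Int) else 1)
      = (if (c + 1, f + 1) ∈ PySem.Set.ofList l1 ∨ (f + 1, i + 1) ∈ PySem.Set.ofList l2
            ∨ (c + 1, i + 1) ∈ PySem.Set.ofList l3 then (0 : Int) else 1) := by
    intro c f i
    simp only [PySem.Set.mem_ofList]
  rw [pvS3_congr _ _ _ _ _ hmem]
  have hb1 : ∀ p ∈ PySem.Set.ofList l1, 1 ≤ p.1 ∧ p.1 ≤ n ∧ 1 ≤ p.2 ∧ p.2 ≤ m :=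
    fun p hp => hl1 p ((PySem.Set.mem_ofList l1 p).mp hp)
  have hb2 : ∀ p ∈ PySem.Set.ofList l2, 1 ≤ p.1 ∧ p.1 ≤ m ∧ 1 ≤ p.2 ∧ p.2 ≤ k :=
    fun p hp => hl2 p ((PySem.Set.mem_ofList l2 p).mp hp)
  have hb3 : ∀ p ∈ PySem.Set.ofList l3, 1 ≤ p.1 ∧ p.1 ≤ n ∧ 1 ≤ p.2 ∧ p.2 ≤ k :=
    fun p hp => hl3 p ((PySem.Set.mem_ofList l3 p).mp hp)
  rw [pvIE n m k hn hm hk (PySem.Set.ofList l1) (PySem.Set.ofList l2) (PySem.Set.ofList l3)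
      (PySem.Set.nodup_ofList l1) (PySem.Set.nodup_ofList l2) (PySem.Set.nodup_ofList l3)
      hb1 hb2 hb3]
  unfold count_compatible_desserts_alt
  rw [if_neg (by omega)]
  rfl
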